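-- pv_equiv track=rewrite | github.com/jiehong05/my_work | parking_fee_calculator.py | type_1
-- ===== SOURCE A (Python) =====
-- def type_1(num, day):
--     if 0 <= num <= 3 and day == 0:
--         total = num * 5
--     elif 4 <= num <= 5 and day == 0:
--         total = 3 * 5 + (num - 3) * 4
--     elif 6 <= num <= 10 and day == 0:
--         total = 3 * 5 + 2 * 4 + (num - 5) * 3
--     elif 11 <= num <= 17 and day == 0:
--         total = 3 * 5 + 2 * 4 + 5 * 3 + (num - 10) * 2
--     elif num >= 18 and day == 0:
--         total = 52
--     else:
--         total = type_1(num, 0) + day * 52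
--     return total
-- ===== SOURCE B (Python) =====
-- def type_1(num, day):
--     if day == 0 and num >= 0:
--         remaining = num
--         total = 0
--         for count, rate in [(3, 5), (2, 4), (5, 3), (7, 2)]:
--             take = min(remaining, count)
--             total += take * rate
--             remaining -= take
--         return total
--     else:
--         return type_1(num, 0) + day * 52
-- ===== Notes on version B (the rewrite author's own statement) =====
-- stated objective: simpler
-- what changed: B replaces A's five-way piecewise arithmetic for day==0 with a single loop over a tier table [(3,5),(2,4),(5,3),(7,2)] that consumes hours at each rate, naturally capping at 52; the recursive day!=0 branch is kept.
import Mathlib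
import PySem

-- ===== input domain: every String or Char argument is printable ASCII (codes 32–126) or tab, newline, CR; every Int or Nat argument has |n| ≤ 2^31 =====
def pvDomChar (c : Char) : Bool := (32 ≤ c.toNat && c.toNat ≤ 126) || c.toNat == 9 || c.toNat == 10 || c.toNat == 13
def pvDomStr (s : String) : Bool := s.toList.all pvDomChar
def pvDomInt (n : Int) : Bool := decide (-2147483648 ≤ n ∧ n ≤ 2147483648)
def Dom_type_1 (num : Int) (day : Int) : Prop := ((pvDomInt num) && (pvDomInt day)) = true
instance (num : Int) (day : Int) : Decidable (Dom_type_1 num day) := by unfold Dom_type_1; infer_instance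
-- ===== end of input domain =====

-- B computes the day==0 fee with a loop over a tier table instead of A's five-way piecewise arithmetic (objective: simpler);
-- Pre_ excludes num < 0, where A (and B) recurse without a base case and raise RecursionError.


-- ===== PORT A =====
def type_1 (num : Int) (day : Int) : Int :=
  if 0 ≤ num ∧ num ≤ 3 ∧ day = 0 then num * 5
  else if 4 ≤ num ∧ num ≤ 5 ∧ day = 0 then 3 * 5 + (num - 3) * 4
  else if 6 ≤ num ∧ num ≤ 10 ∧ day = 0 then 3 * 5 + 2 * 4 + (num - 5) * 3
  else if 11 ≤ num ∧ num ≤ 17 ∧ day = 0 then 3 * 5 + 2 * 4 + 5 * 3 + (num - 10) * 2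
  else if 18 ≤ num ∧ day = 0 then 52
  else if day = 0 then 0  -- totality guard: Python recurses forever here (num < 0); excluded by Pre_
  else type_1 num 0 + day * 52
termination_by day.natAbs
decreasing_by simp_all

-- ===== PORT B =====
def type_1_alt (num : Int) (day : Int) : Int :=
  if day = 0 ∧ 0 ≤ num then
    (([(3, 5), (2, 4), (5, 3), (7, 2)] : List (Int × Int)).foldl
      (fun (s : Int × Int) cr =>
        let take := min s.1 cr.1
        (s.1 - take, s.2 + take * cr.2)) (num, 0)).2
  else if day = 0 then 0  -- totality guard: Python recurses forever here (num < 0); excluded by Pre_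
  else type_1_alt num 0 + day * 52
termination_by day.natAbs
decreasing_by simp_all

-- ===== PRECONDITION & SPEC =====
-- Pre_ excludes num < 0: there the Python A hits the else branch with day already 0 and recurses forever (RecursionError).
def Pre_type_1 (num : Int) (day : Int) : Prop := 0 ≤ num
instance (num : Int) (day : Int) : Decidable (Pre_type_1 num day) := by unfold Pre_type_1; infer_instance
def pvWitness_type_1 : Int × Int := (7, 2)
def Spec_type_1 (num : Int) (day : Int) (out : Int) : Prop := out = type_1_alt num day
instance (num : Int) (day : Int) (out : Int) : Decidable (Spec_type_1 num day out) := by unfold Spec_type_1; infer_instance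

-- ===== CLAIM (what is proved, stated in full; the proofs are below) =====
def Claim_equal_type_1 : Prop := ∀ (num : Int) (day : Int), Dom_type_1 num day → Pre_type_1 num day → Spec_type_1 num day (type_1 num day)

-- ===== LEMMAS AND PROOFS =====
lemma type_1_base (num : Int) (h : 0 ≤ num) : type_1 num 0 = type_1_alt num 0 := by
  rw [type_1.eq_def, type_1_alt.eq_def]
  simp [List.foldl, min_def]
  split_ifs <;> omega

-- ===== VERDICT (by name: the statement is the Claim_ definition above) =====
theorem type_1_spec : Claim_equal_type_1 := by
  intro num day _ hpre
  unfold Spec_type_1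
  by_cases hd : day = 0
  · subst hd; exact type_1_base num hpre
  · rw [type_1.eq_def, type_1_alt.eq_def]
    simp only [hd, and_false, false_and, if_false]
    rw [type_1_base num hpre]
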